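-- pv_equiv track=rewrite | github.com/anhdnguye/Zoom-ETL | lambda/zoom_webhook/handler.py | select_preferred_recordings
-- ===== SOURCE A (Python) =====
-- def select_preferred_recordings(zoom_recordings):
--     accepted_recording = [
--         ['shared_screen_with_gallery_view(CC)', 'shared_screen_with_gallery_view', 'shared_screen_with_speaker_view', 'gallery_view', 'active_speaker', 'audio_only'],
--         ['audio_transcript'],
--         ['chat_file'],
--         ['poll']
--     ]
--     # Convert zoom recordings to a dict for fast lookup
--     file_lookup = {rec['file_type']: rec for rec in zoom_recordings}
--
--     selected = []
--
--     for category in accepted_recording: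
--         for preferred_type in category:
--             if preferred_type in file_lookup:
--                 selected.append(file_lookup[preferred_type])
--                 break  # Only take the first available in this category
--
--     return selected
-- ===== SOURCE B (Python) =====
-- _INDEX = {
--     'shared_screen_with_gallery_view(CC)': (0, 0),
--     'shared_screen_with_gallery_view': (0, 1),
--     'shared_screen_with_speaker_view': (0, 2),
--     'gallery_view': (0, 3),
--     'active_speaker': (0, 4),
--     'audio_only': (0, 5),
--     'audio_transcript': (1, 0),
--     'chat_file': (2, 0),
--     'poll': (3, 0),
-- }
--
--
-- def select_preferred_recordings(zoom_recordings):
--     # One pass: keep, per category, the best (lowest-preference, latest on ties) recording.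
--     best = [None, None, None, None]
--     for rec in zoom_recordings:
--         pos = _INDEX.get(rec['file_type'])
--         if pos is not None:
--             cat, pref = pos
--             if best[cat] is None or pref <= best[cat][0]:
--                 best[cat] = (pref, rec)
--     return [b[1] for b in best if b is not None]
-- ===== Notes on version B (the rewrite author's own statement) =====
-- stated objective: alternative
-- what changed: Replaces A's build-a-file_type-dict-then-scan-the-category-table decomposition by an inverted index (file_type -> (category, preference)) and a single best-per-category pass over the recordings, collecting the four category slots at the end.
import Mathlib
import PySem

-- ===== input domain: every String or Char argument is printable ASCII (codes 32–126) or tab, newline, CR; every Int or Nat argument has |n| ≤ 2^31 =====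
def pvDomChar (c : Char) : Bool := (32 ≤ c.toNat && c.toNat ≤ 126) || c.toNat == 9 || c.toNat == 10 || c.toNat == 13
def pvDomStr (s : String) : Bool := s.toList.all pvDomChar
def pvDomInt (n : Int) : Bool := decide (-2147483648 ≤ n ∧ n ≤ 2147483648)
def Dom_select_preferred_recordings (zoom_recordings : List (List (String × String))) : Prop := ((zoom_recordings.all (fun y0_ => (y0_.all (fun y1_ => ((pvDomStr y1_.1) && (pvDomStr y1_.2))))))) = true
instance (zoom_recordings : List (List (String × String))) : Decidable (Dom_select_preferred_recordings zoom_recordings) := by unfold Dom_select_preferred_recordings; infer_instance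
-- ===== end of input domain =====

-- B replaces A's category-table scan over a lookup dict by an inverted index and a single
-- best-per-category pass (alternative decomposition; return value only, no mutation involved).

-- rec['file_type'] (both Pythons read it; inside Pre_ the key is present, so the "" default is never used)
def pvKey (rec : List (String × String)) : String :=
  (PySem.Dict.mk rec).getD "file_type" ""

-- ===== PORT A =====
def pvAccepted : List (List String) :=
  [["shared_screen_with_gallery_view(CC)", "shared_screen_with_gallery_view",
    "shared_screen_with_speaker_view", "gallery_view", "active_speaker", "audio_only"],
   ["audio_transcript"],
   ["chat_file"],
   ["poll"]]

-- the inner 'for preferred_type in category: … break' loop of A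
def pvFirstAvail (fl : PySem.Dict String (List (String × String))) :
    List String → Option (List (String × String))
  | [] => none
  | t :: ts =>
    match fl.get? t with
    | some r => some r
    | none => pvFirstAvail fl ts

def select_preferred_recordings (zoom_recordings : List (List (String × String))) :
    List (List (String × String)) :=
  let file_lookup : PySem.Dict String (List (String × String)) :=
    zoom_recordings.foldl (fun d rec => d.insert (pvKey rec) rec) PySem.Dict.empty
  pvAccepted.foldl
    (fun selected category =>
      match pvFirstAvail file_lookup category with
      | some r => selected ++ [r]
      | none => selected)
    []

-- ===== PORT B =====
def pvIndex : PySem.Dict String (Nat × Nat) :=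
  PySem.Dict.ofList
    [("shared_screen_with_gallery_view(CC)", (0, 0)),
     ("shared_screen_with_gallery_view", (0, 1)),
     ("shared_screen_with_speaker_view", (0, 2)),
     ("gallery_view", (0, 3)),
     ("active_speaker", (0, 4)),
     ("audio_only", (0, 5)),
     ("audio_transcript", (1, 0)),
     ("chat_file", (2, 0)),
     ("poll", (3, 0))]

-- the body of B's single loop
def pvStep (best : List (Option (Nat × List (String × String))))
    (rec : List (String × String)) : List (Option (Nat × List (String × String))) :=
  match pvIndex.get? (pvKey rec) with
  | none => best
  | some (cat, pref) =>
    match best.getD cat none with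
    | none => best.set cat (some (pref, rec))
    | some (p, _) => if pref ≤ p then best.set cat (some (pref, rec)) else best

def select_preferred_recordings_alt (zoom_recordings : List (List (String × String))) :
    List (List (String × String)) :=
  (zoom_recordings.foldl pvStep [none, none, none, none]).filterMap
    (fun b => b.map Prod.snd)

-- ===== PRECONDITION & SPEC =====
-- Pre_ excludes exactly the inputs where a recording lacks the 'file_type' key: Python A
-- (and Python B) raise KeyError there.
def Pre_select_preferred_recordings (zoom_recordings : List (List (String × String))) : Prop :=
  ∀ rec ∈ zoom_recordings, ((PySem.Dict.mk rec).get? "file_type").isSome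
instance (zoom_recordings : List (List (String × String))) :
    Decidable (Pre_select_preferred_recordings zoom_recordings) := by
  unfold Pre_select_preferred_recordings; infer_instance

def pvWitness_select_preferred_recordings : (List (List (String × String))) :=
  [[("file_type", "audio_only"), ("id", "1")], [("file_type", "chat_file")]]

def Spec_select_preferred_recordings (zoom_recordings : List (List (String × String))) (out : List (List (String × String))) : Prop := out = select_preferred_recordings_alt zoom_recordings
instance (zoom_recordings : List (List (String × String))) (out : List (List (String × String))) : Decidable (Spec_select_preferred_recordings zoom_recordings out) := by unfold Spec_select_preferred_recordings; infer_instance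

-- ===== CLAIM (what is proved, stated in full; the proofs are below) =====
def Claim_equal_select_preferred_recordings : Prop := ∀ (zoom_recordings : List (List (String × String))), Dom_select_preferred_recordings zoom_recordings → Pre_select_preferred_recordings zoom_recordings → Spec_select_preferred_recordings zoom_recordings (select_preferred_recordings zoom_recordings)

-- ===== LEMMAS AND PROOFS =====

-- the per-category state B maintains, characterised over A's lookup dict
def pvHit (d : PySem.Dict String (List (String × String))) :
    List String → Nat → Option (Nat × List (String × String))
  | [], _ => none
  | t :: ts, i =>
    match d.get? t with
    | some r => some (i, r)
    | none => pvHit d ts (i + 1)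

def pvInv (d : PySem.Dict String (List (String × String))) :
    List (Option (Nat × List (String × String))) :=
  pvAccepted.map (fun ts => pvHit d ts 0)

lemma pvHit_ge (d : PySem.Dict String (List (String × String))) :
    ∀ ts i p r, pvHit d ts i = some (p, r) → i ≤ p := by
  intro ts
  induction ts with
  | nil => intro i p r h; simp [pvHit] at h
  | cons t ts ih =>
    intro i p r h
    simp only [pvHit] at h
    cases hg : d.get? t with
    | some v => rw [hg] at h; simp at h; omega
    | none => rw [hg] at h; have := ih (i + 1) p r h; omega

lemma pvFirstAvail_eq_hit (d : PySem.Dict String (List (String × String))) :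
    ∀ ts i, pvFirstAvail d ts = (pvHit d ts i).map Prod.snd := by
  intro ts
  induction ts with
  | nil => intro i; simp [pvFirstAvail, pvHit]
  | cons t ts ih =>
    intro i
    simp only [pvFirstAvail, pvHit]
    cases hg : d.get? t with
    | some v => simp
    | none => simpa using ih (i + 1)

lemma pvHit_insert_not_mem (d : PySem.Dict String (List (String × String)))
    (k : String) (v : List (String × String)) :
    ∀ ts i, k ∉ ts → pvHit (d.insert k v) ts i = pvHit d ts i := by
  intro ts
  induction ts with
  | nil => intro i _; rfl
  | cons t ts ih =>
    intro i h
    have ht : t ≠ k := by intro e; exact h (e ▸ List.mem_cons_self)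
    have hts : k ∉ ts := fun m => h (List.mem_cons_of_mem _ m)
    simp only [pvHit, PySem.Dict.get?_insert_of_ne d v ht, ih (i + 1) hts]

lemma pvHit_insert_mem (d : PySem.Dict String (List (String × String)))
    (k : String) (v : List (String × String)) :
    ∀ ts i, k ∈ ts → ts.Nodup →
      pvHit (d.insert k v) ts i =
        match pvHit d ts i with
        | none => some (i + ts.idxOf k, v)
        | some (p, r) => if i + ts.idxOf k ≤ p then some (i + ts.idxOf k, v) else some (p, r) := by
  intro ts
  induction ts with
  | nil => intro i h; simp at h
  | cons t ts ih =>
    intro i hmem hnd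
    by_cases hk : t = k
    · subst hk
      simp only [pvHit, PySem.Dict.get?_insert_self, List.idxOf_cons_self, Nat.add_zero]
      cases hg : d.get? t with
      | some r => simp
      | none =>
        cases hh : pvHit d ts (i + 1) with
        | none => simp
        | some pr =>
          obtain ⟨p, r⟩ := pr
          have := pvHit_ge d ts (i + 1) p r hh
          simp [Nat.le_of_lt (by omega : i < p)]
    · have hk' : k ≠ t := fun e => hk e.symm
      have hmem' : k ∈ ts := by rcases List.mem_cons.mp hmem with e | m; exact absurd e.symm hk; exact m
      have hnd' : ts.Nodup := hnd.of_cons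
      have hidx : (t :: ts).idxOf k = ts.idxOf k + 1 := by
        simp [hk]
      simp only [pvHit, PySem.Dict.get?_insert_of_ne d v hk, hidx]
      cases hg : d.get? t with
      | some r =>
        have : ¬ (i + (ts.idxOf k + 1) ≤ i) := by omega
        simp [this]
      | none =>
        rw [ih (i + 1) hmem' hnd']
        have : i + 1 + ts.idxOf k = i + (ts.idxOf k + 1) := by omega
        rw [this]

lemma pvStep_inv (d : PySem.Dict String (List (String × String)))
    (rec : List (String × String)) :
    pvStep (pvInv d) rec = pvInv (d.insert (pvKey rec) rec) := by
  by_cases h1 : pvKey rec = "shared_screen_with_gallery_view(CC)"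
  · simp only [pvStep, pvInv, pvAccepted, List.map]
    rw [h1]
    rw [show pvIndex.get? "shared_screen_with_gallery_view(CC)" = some (0, 0) from by decide]
    rw [pvHit_insert_mem d "shared_screen_with_gallery_view(CC)" rec (["shared_screen_with_gallery_view(CC)", "shared_screen_with_gallery_view", "shared_screen_with_speaker_view", "gallery_view", "active_speaker", "audio_only"] : List String) 0 (by decide) (by decide)]
    rw [pvHit_insert_not_mem d "shared_screen_with_gallery_view(CC)" rec (["audio_transcript"] : List String) 0 (by decide)]
    rw [pvHit_insert_not_mem d "shared_screen_with_gallery_view(CC)" rec (["chat_file"] : List String) 0 (by decide)]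
    rw [pvHit_insert_not_mem d "shared_screen_with_gallery_view(CC)" rec (["poll"] : List String) 0 (by decide)]
    rw [show (["shared_screen_with_gallery_view(CC)", "shared_screen_with_gallery_view", "shared_screen_with_speaker_view", "gallery_view", "active_speaker", "audio_only"] : List String).idxOf "shared_screen_with_gallery_view(CC)" = 0 from by decide]
    rcases hH : pvHit d (["shared_screen_with_gallery_view(CC)", "shared_screen_with_gallery_view", "shared_screen_with_speaker_view", "gallery_view", "active_speaker", "audio_only"] : List String) 0 with _ | ⟨p, r⟩ <;>
      simp [hH, List.getD] <;> split_ifs <;> simp_all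
  by_cases h2 : pvKey rec = "shared_screen_with_gallery_view"
  · simp only [pvStep, pvInv, pvAccepted, List.map]
    rw [h2]
    rw [show pvIndex.get? "shared_screen_with_gallery_view" = some (0, 1) from by decide]
    rw [pvHit_insert_mem d "shared_screen_with_gallery_view" rec (["shared_screen_with_gallery_view(CC)", "shared_screen_with_gallery_view", "shared_screen_with_speaker_view", "gallery_view", "active_speaker", "audio_only"] : List String) 0 (by decide) (by decide)]
    rw [pvHit_insert_not_mem d "shared_screen_with_gallery_view" rec (["audio_transcript"] : List String) 0 (by decide)]
    rw [pvHit_insert_not_mem d "shared_screen_with_gallery_view" rec (["chat_file"] : List String) 0 (by decide)]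
    rw [pvHit_insert_not_mem d "shared_screen_with_gallery_view" rec (["poll"] : List String) 0 (by decide)]
    rw [show (["shared_screen_with_gallery_view(CC)", "shared_screen_with_gallery_view", "shared_screen_with_speaker_view", "gallery_view", "active_speaker", "audio_only"] : List String).idxOf "shared_screen_with_gallery_view" = 1 from by decide]
    rcases hH : pvHit d (["shared_screen_with_gallery_view(CC)", "shared_screen_with_gallery_view", "shared_screen_with_speaker_view", "gallery_view", "active_speaker", "audio_only"] : List String) 0 with _ | ⟨p, r⟩ <;>
      simp [hH, List.getD] <;> split_ifs <;> simp_all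
  by_cases h3 : pvKey rec = "shared_screen_with_speaker_view"
  · simp only [pvStep, pvInv, pvAccepted, List.map]
    rw [h3]
    rw [show pvIndex.get? "shared_screen_with_speaker_view" = some (0, 2) from by decide]
    rw [pvHit_insert_mem d "shared_screen_with_speaker_view" rec (["shared_screen_with_gallery_view(CC)", "shared_screen_with_gallery_view", "shared_screen_with_speaker_view", "gallery_view", "active_speaker", "audio_only"] : List String) 0 (by decide) (by decide)]
    rw [pvHit_insert_not_mem d "shared_screen_with_speaker_view" rec (["audio_transcript"] : List String) 0 (by decide)]
    rw [pvHit_insert_not_mem d "shared_screen_with_speaker_view" rec (["chat_file"] : List String) 0 (by decide)]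
    rw [pvHit_insert_not_mem d "shared_screen_with_speaker_view" rec (["poll"] : List String) 0 (by decide)]
    rw [show (["shared_screen_with_gallery_view(CC)", "shared_screen_with_gallery_view", "shared_screen_with_speaker_view", "gallery_view", "active_speaker", "audio_only"] : List String).idxOf "shared_screen_with_speaker_view" = 2 from by decide]
    rcases hH : pvHit d (["shared_screen_with_gallery_view(CC)", "shared_screen_with_gallery_view", "shared_screen_with_speaker_view", "gallery_view", "active_speaker", "audio_only"] : List String) 0 with _ | ⟨p, r⟩ <;>
      simp [hH, List.getD] <;> split_ifs <;> simp_all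
  by_cases h4 : pvKey rec = "gallery_view"
  · simp only [pvStep, pvInv, pvAccepted, List.map]
    rw [h4]
    rw [show pvIndex.get? "gallery_view" = some (0, 3) from by decide]
    rw [pvHit_insert_mem d "gallery_view" rec (["shared_screen_with_gallery_view(CC)", "shared_screen_with_gallery_view", "shared_screen_with_speaker_view", "gallery_view", "active_speaker", "audio_only"] : List String) 0 (by decide) (by decide)]
    rw [pvHit_insert_not_mem d "gallery_view" rec (["audio_transcript"] : List String) 0 (by decide)]
    rw [pvHit_insert_not_mem d "gallery_view" rec (["chat_file"] : List String) 0 (by decide)]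
    rw [pvHit_insert_not_mem d "gallery_view" rec (["poll"] : List String) 0 (by decide)]
    rw [show (["shared_screen_with_gallery_view(CC)", "shared_screen_with_gallery_view", "shared_screen_with_speaker_view", "gallery_view", "active_speaker", "audio_only"] : List String).idxOf "gallery_view" = 3 from by decide]
    rcases hH : pvHit d (["shared_screen_with_gallery_view(CC)", "shared_screen_with_gallery_view", "shared_screen_with_speaker_view", "gallery_view", "active_speaker", "audio_only"] : List String) 0 with _ | ⟨p, r⟩ <;>
      simp [hH, List.getD] <;> split_ifs <;> simp_all
  by_cases h5 : pvKey rec = "active_speaker"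
  · simp only [pvStep, pvInv, pvAccepted, List.map]
    rw [h5]
    rw [show pvIndex.get? "active_speaker" = some (0, 4) from by decide]
    rw [pvHit_insert_mem d "active_speaker" rec (["shared_screen_with_gallery_view(CC)", "shared_screen_with_gallery_view", "shared_screen_with_speaker_view", "gallery_view", "active_speaker", "audio_only"] : List String) 0 (by decide) (by decide)]
    rw [pvHit_insert_not_mem d "active_speaker" rec (["audio_transcript"] : List String) 0 (by decide)]
    rw [pvHit_insert_not_mem d "active_speaker" rec (["chat_file"] : List String) 0 (by decide)]
    rw [pvHit_insert_not_mem d "active_speaker" rec (["poll"] : List String) 0 (by decide)]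
    rw [show (["shared_screen_with_gallery_view(CC)", "shared_screen_with_gallery_view", "shared_screen_with_speaker_view", "gallery_view", "active_speaker", "audio_only"] : List String).idxOf "active_speaker" = 4 from by decide]
    rcases hH : pvHit d (["shared_screen_with_gallery_view(CC)", "shared_screen_with_gallery_view", "shared_screen_with_speaker_view", "gallery_view", "active_speaker", "audio_only"] : List String) 0 with _ | ⟨p, r⟩ <;>
      simp [hH, List.getD] <;> split_ifs <;> simp_all
  by_cases h6 : pvKey rec = "audio_only"
  · simp only [pvStep, pvInv, pvAccepted, List.map]
    rw [h6]
    rw [show pvIndex.get? "audio_only" = some (0, 5) from by decide]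
    rw [pvHit_insert_mem d "audio_only" rec (["shared_screen_with_gallery_view(CC)", "shared_screen_with_gallery_view", "shared_screen_with_speaker_view", "gallery_view", "active_speaker", "audio_only"] : List String) 0 (by decide) (by decide)]
    rw [pvHit_insert_not_mem d "audio_only" rec (["audio_transcript"] : List String) 0 (by decide)]
    rw [pvHit_insert_not_mem d "audio_only" rec (["chat_file"] : List String) 0 (by decide)]
    rw [pvHit_insert_not_mem d "audio_only" rec (["poll"] : List String) 0 (by decide)]
    rw [show (["shared_screen_with_gallery_view(CC)", "shared_screen_with_gallery_view", "shared_screen_with_speaker_view", "gallery_view", "active_speaker", "audio_only"] : List String).idxOf "audio_only" = 5 from by decide]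
    rcases hH : pvHit d (["shared_screen_with_gallery_view(CC)", "shared_screen_with_gallery_view", "shared_screen_with_speaker_view", "gallery_view", "active_speaker", "audio_only"] : List String) 0 with _ | ⟨p, r⟩ <;>
      simp [hH, List.getD] <;> split_ifs <;> simp_all
  by_cases h7 : pvKey rec = "audio_transcript"
  · simp only [pvStep, pvInv, pvAccepted, List.map]
    rw [h7]
    rw [show pvIndex.get? "audio_transcript" = some (1, 0) from by decide]
    rw [pvHit_insert_mem d "audio_transcript" rec (["audio_transcript"] : List String) 0 (by decide) (by decide)]
    rw [pvHit_insert_not_mem d "audio_transcript" rec (["shared_screen_with_gallery_view(CC)", "shared_screen_with_gallery_view", "shared_screen_with_speaker_view", "gallery_view", "active_speaker", "audio_only"] : List String) 0 (by decide)]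
    rw [pvHit_insert_not_mem d "audio_transcript" rec (["chat_file"] : List String) 0 (by decide)]
    rw [pvHit_insert_not_mem d "audio_transcript" rec (["poll"] : List String) 0 (by decide)]
    rw [show (["audio_transcript"] : List String).idxOf "audio_transcript" = 0 from by decide]
    rcases hH : pvHit d (["audio_transcript"] : List String) 0 with _ | ⟨p, r⟩ <;>
      simp [hH, List.getD] <;> split_ifs <;> simp_all
  by_cases h8 : pvKey rec = "chat_file"
  · simp only [pvStep, pvInv, pvAccepted, List.map]
    rw [h8]
    rw [show pvIndex.get? "chat_file" = some (2, 0) from by decide]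
    rw [pvHit_insert_mem d "chat_file" rec (["chat_file"] : List String) 0 (by decide) (by decide)]
    rw [pvHit_insert_not_mem d "chat_file" rec (["shared_screen_with_gallery_view(CC)", "shared_screen_with_gallery_view", "shared_screen_with_speaker_view", "gallery_view", "active_speaker", "audio_only"] : List String) 0 (by decide)]
    rw [pvHit_insert_not_mem d "chat_file" rec (["audio_transcript"] : List String) 0 (by decide)]
    rw [pvHit_insert_not_mem d "chat_file" rec (["poll"] : List String) 0 (by decide)]
    rw [show (["chat_file"] : List String).idxOf "chat_file" = 0 from by decide]
    rcases hH : pvHit d (["chat_file"] : List String) 0 with _ | ⟨p, r⟩ <;>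
      simp [hH, List.getD] <;> split_ifs <;> simp_all
  by_cases h9 : pvKey rec = "poll"
  · simp only [pvStep, pvInv, pvAccepted, List.map]
    rw [h9]
    rw [show pvIndex.get? "poll" = some (3, 0) from by decide]
    rw [pvHit_insert_mem d "poll" rec (["poll"] : List String) 0 (by decide) (by decide)]
    rw [pvHit_insert_not_mem d "poll" rec (["shared_screen_with_gallery_view(CC)", "shared_screen_with_gallery_view", "shared_screen_with_speaker_view", "gallery_view", "active_speaker", "audio_only"] : List String) 0 (by decide)]
    rw [pvHit_insert_not_mem d "poll" rec (["audio_transcript"] : List String) 0 (by decide)]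
    rw [pvHit_insert_not_mem d "poll" rec (["chat_file"] : List String) 0 (by decide)]
    rw [show (["poll"] : List String).idxOf "poll" = 0 from by decide]
    rcases hH : pvHit d (["poll"] : List String) 0 with _ | ⟨p, r⟩ <;>
      simp [hH, List.getD] <;> split_ifs <;> simp_all
  · have hnone : pvIndex.get? (pvKey rec) = none := by
      rw [show pvIndex = PySem.Dict.mk [("shared_screen_with_gallery_view(CC)", ((0:Nat), (0:Nat))),
         ("shared_screen_with_gallery_view", (0, 1)),
         ("shared_screen_with_speaker_view", (0, 2)),
         ("gallery_view", (0, 3)),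
         ("active_speaker", (0, 4)),
         ("audio_only", (0, 5)),
         ("audio_transcript", (1, 0)),
         ("chat_file", (2, 0)),
         ("poll", (3, 0))] from by decide]
      simp only [PySem.Dict.get?_mk_cons, beq_iff_eq]
      split_ifs <;> simp_all [eq_comm, PySem.Dict.get?]
    simp only [pvStep, pvInv, pvAccepted, List.map, hnone]
    rw [pvHit_insert_not_mem d (pvKey rec) rec (["shared_screen_with_gallery_view(CC)", "shared_screen_with_gallery_view", "shared_screen_with_speaker_view", "gallery_view", "active_speaker", "audio_only"] : List String) 0 (by simp_all)]
    rw [pvHit_insert_not_mem d (pvKey rec) rec (["audio_transcript"] : List String) 0 (by simp_all)]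
    rw [pvHit_insert_not_mem d (pvKey rec) rec (["chat_file"] : List String) 0 (by simp_all)]
    rw [pvHit_insert_not_mem d (pvKey rec) rec (["poll"] : List String) 0 (by simp_all)]


lemma pvFold_inv (zs : List (List (String × String))) :
    ∀ d, zs.foldl pvStep (pvInv d) =
      pvInv (zs.foldl (fun d rec => d.insert (pvKey rec) rec) d) := by
  induction zs with
  | nil => intro d; rfl
  | cons rec zs ih => intro d; simp only [List.foldl, pvStep_inv, ih]

-- ===== VERDICT (by name: the statement is the Claim_ definition above) =====
theorem select_preferred_recordings_spec : Claim_equal_select_preferred_recordings := by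
  intro zs _ _
  unfold Spec_select_preferred_recordings
  unfold select_preferred_recordings select_preferred_recordings_alt
  have h0 : pvInv PySem.Dict.empty = [none, none, none, none] := by decide
  rw [← h0, pvFold_inv]
  set D := zs.foldl (fun d rec => d.insert (pvKey rec) rec) PySem.Dict.empty with hD
  simp only [pvInv, pvAccepted, List.map, List.foldl, List.filterMap,
    pvFirstAvail_eq_hit D _ 0]
  rcases pvHit D _ 0 with _ | ⟨p0, r0⟩ <;>
  rcases pvHit D _ 0 with _ | ⟨p1, r1⟩ <;>
  rcases pvHit D _ 0 with _ | ⟨p2, r2⟩ <;>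
  rcases pvHit D _ 0 with _ | ⟨p3, r3⟩ <;> simp
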